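-- pv_equiv track=rewrite | github.com/sritanvi/Daily-Coding-Problem | Problem#226.py | solve
-- ===== SOURCE A (Python) =====
-- def solve(arr):
--
--     unique_word = set()
--     new_arr = []
--     k = 0
--     arr = list(map(str, arr))
--     for i in arr:
--         new_arr.append([])
--         for j in i:
--             new_arr[k].append(j)
--         k += 1
--
--     for i in arr:
--         for j in str(i):
--             unique_word.add(j)
--
--     _dict = {i : {j:0 for j in unique_word if i != j} for i in unique_word}
--
--     word_list = {}
--
--     for i in unique_word:
--         word_list[i] = 0
--     k = 0
--     max_len = 0
--     for i in new_arr: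
--        if max_len < len(i):
--            max_len = len(i)
--
--     for i in range(len(new_arr)):
--         for j in range(max_len - len(new_arr[i])):
--             new_arr[i].append(' ')
--
--     for k in range(max_len):
--         for i in range(len(new_arr)-1):
--             for j in range(i+1, len(new_arr)):
--                 if ''.join(new_arr[i][0:k]) == ''.join(new_arr[j][0:k]) and new_arr[i][k] in _dict  and new_arr[j][k] in _dict[new_arr[i][k]] and  _dict[new_arr[i][k]][new_arr[j][k]] == 0:
--                     _dict[new_arr[i][k]][new_arr[j][k]],_dict[new_arr[j][k]][new_arr[i][k]] = 1, 1
--                     word_list[new_arr[i][k]] += 1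
--
--     res = []
--     for i in word_list:
--         res.append([word_list[i], i])
--     res = sorted(res, reverse = True)
--
--     result = []
--
--
--     for i in res:
--         result.append(i[1])
--
--     return result
-- ===== SOURCE B (Python) =====
-- def solve(arr):
--     words = [str(w) for w in arr]
--     n = len(words)
--     max_len = max((len(w) for w in words), default=0)
--     chars = set()
--     for w in words:
--         chars.update(w)
--
--     def ch(w, k):
--         return w[k] if k < len(w) else ' '
--
--     # bucket each pair (i, j) by the length of the common prefix of the
--     # two space-padded words: the pair can contribute only at that level
--     buckets = [[] for _ in range(max_len + 1)]
--     for i in range(n):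
--         for j in range(i + 1, n):
--             l = 0
--             while l < max_len and ch(words[i], l) == ch(words[j], l):
--                 l += 1
--             buckets[l].append((i, j))
--
--     count = {c: 0 for c in chars}
--     seen = set()
--     for k in range(max_len):
--         for (i, j) in buckets[k]:
--             a, b = ch(words[i], k), ch(words[j], k)
--             if a in chars and b in chars:
--                 p = (a, b) if a < b else (b, a)
--                 if p not in seen:
--                     seen.add(p)
--                     count[a] += 1
--
--     return sorted(chars, key=lambda c: (count[c], c), reverse=True)
-- ===== Notes on version B (the rewrite author's own statement) =====
-- stated objective: faster
-- what changed: Instead of re-joining and comparing the two k-prefixes for every (level k, pair i<j) triple, B computes each pair's common-prefix length once (on space-padded words) and buckets the pair at the single level where it can contribute, then sweeps the levels once; counting uses a set of normalized char pairs instead of a nested 0/1 flag dict. Intended as faster by an O(L) factor; a timing run measured 2.5-3.5x (n=64..1024) and both time out at n=4096, since both remain O(n^2) in the number of words.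
import Mathlib
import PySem

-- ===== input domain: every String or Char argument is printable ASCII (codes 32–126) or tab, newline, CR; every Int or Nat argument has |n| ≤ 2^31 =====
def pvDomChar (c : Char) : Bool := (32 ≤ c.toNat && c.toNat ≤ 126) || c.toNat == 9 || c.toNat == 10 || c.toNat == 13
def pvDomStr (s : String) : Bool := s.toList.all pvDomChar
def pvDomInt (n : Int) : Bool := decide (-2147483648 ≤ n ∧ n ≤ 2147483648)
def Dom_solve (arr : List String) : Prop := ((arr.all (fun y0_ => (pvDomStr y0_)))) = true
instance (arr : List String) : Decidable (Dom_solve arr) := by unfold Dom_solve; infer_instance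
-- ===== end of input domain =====

-- B replaces A's per-(k,i,j) prefix re-join/compare by a one-off common-prefix-length
-- bucket per word pair swept level by level: exact, and removes an O(max word length)
-- factor (a timing run measured 2.5-3.5x on its inputs; both stay quadratic in the
-- number of words).


-- ===== PORT A =====
-- new_arr: for i in arr: new_arr.append([]); for j in i: new_arr[k].append(j)
def aNewArr (arr : List String) : List (List Char) :=
  arr.foldl (fun acc s => acc ++ [s.toList.foldl (fun w c => w ++ [c]) []]) []

-- unique_word: for i in arr: for j in str(i): unique_word.add(j)   (str is the identity on str)
def aUniq (arr : List String) : PySem.Set Char :=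
  arr.foldl (fun u s => s.toList.foldl (fun u c => PySem.Set.add u c) u) PySem.Set.empty

-- {j: 0 for j in unique_word if i != j}
def aInner (uniq : List Char) (a : Char) : PySem.Dict Char Int :=
  uniq.foldl (fun d b => if a ≠ b then d.insert b (0 : Int) else d) PySem.Dict.empty

-- _dict = {i : {…} for i in unique_word}
def aDict0 (uniq : List Char) : PySem.Dict Char (PySem.Dict Char Int) :=
  uniq.foldl (fun D a => D.insert a (aInner uniq a)) PySem.Dict.empty

-- for i in unique_word: word_list[i] = 0
def aWl0 (uniq : List Char) : PySem.Dict Char Int :=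
  uniq.foldl (fun d c => d.insert c (0 : Int)) PySem.Dict.empty

-- for i in new_arr: if max_len < len(i): max_len = len(i)
def aMaxLen (newArr : List (List Char)) : Nat :=
  newArr.foldl (fun m l => if m < l.length then l.length else m) 0

-- for i in range(len(new_arr)): for j in range(max_len - len(new_arr[i])): new_arr[i].append(' ')
-- (each row i is extended in place; ported row-wise as a map)
def aPad (maxLen : Nat) (newArr : List (List Char)) : List (List Char) :=
  newArr.map (fun l => (List.range (maxLen - l.length)).foldl (fun w _ => w ++ [' ']) l)

-- the body of the triple loop; indices k i j are always in range (rows padded to max_len),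
-- so the row/char reads new_arr[i], new_arr[i][k] are ported with getD (never out of range here)
def aStep (padded : List (List Char)) (k i j : Nat)
    (st : PySem.Dict Char (PySem.Dict Char Int) × PySem.Dict Char Int) :
    PySem.Dict Char (PySem.Dict Char Int) × PySem.Dict Char Int :=
  let xi := padded.getD i []
  let xj := padded.getD j []
  -- ''.join(new_arr[i][0:k]) == ''.join(new_arr[j][0:k])
  if String.ofList (PySem.List.slice xi (some 0) (some (k : Int))) =
     String.ofList (PySem.List.slice xj (some 0) (some (k : Int))) then
    let a := xi.getD k ' '
    let b := xj.getD k ' '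
    match st.1.get? a with                        -- new_arr[i][k] in _dict
    | none => st
    | some da =>
      match da.get? b with                        -- new_arr[j][k] in _dict[new_arr[i][k]]
      | none => st
      | some v =>
        if v = 0 then                             -- _dict[a][b] == 0
          -- _dict[a][b], _dict[b][a] = 1, 1 ; word_list[a] += 1
          (((st.1.insert a (da.insert b 1)).modify b PySem.Dict.empty (fun db => db.insert a 1)),
           st.2.modify a (0 : Int) (· + 1))
        else st
  else st

-- for k in range(max_len): for i in range(len(new_arr)-1): for j in range(i+1, len(new_arr)): …
def aLoop (padded : List (List Char)) (maxLen n : Nat)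
    (st0 : PySem.Dict Char (PySem.Dict Char Int) × PySem.Dict Char Int) :
    PySem.Dict Char (PySem.Dict Char Int) × PySem.Dict Char Int :=
  (List.range maxLen).foldl (fun st k =>
    (List.range (n - 1)).foldl (fun st i =>
      (List.range' (i + 1) (n - 1 - i)).foldl (fun st j => aStep padded k i j st) st) st) st0

def solve (arr : List String) : List String :=
  let newArr := aNewArr arr
  let uniq := aUniq arr
  let maxLen := aMaxLen newArr
  let padded := aPad maxLen newArr
  let st := aLoop padded maxLen padded.length (aDict0 uniq, aWl0 uniq)
  -- res = [[word_list[i], i] for i in word_list]; res = sorted(res, reverse=True)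
  let res := st.2.items.foldl (fun (r : List (Int × Char)) p => r ++ [(p.2, p.1)]) []
  (PySem.List.sorted2 res Prod.fst Prod.snd true).foldl (fun r p => r ++ [String.ofList [p.2]]) []

-- ===== PORT B =====
-- while l < max_len and ch(words[i], l) == ch(words[j], l): l += 1
def lcpGo (x y : List Char) (maxLen l : Nat) : Nat :=
  if h : l < maxLen ∧ x.getD l ' ' = y.getD l ' ' then lcpGo x y maxLen (l + 1) else l
  termination_by maxLen - l
  decreasing_by omega

-- buckets[l].append((i, j)) for each pair, l = common-prefix length of the padded words
-- (ch(w, k) = w[k] if k < len(w) else ' '  is  (w.getD k ' '))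
def bBuckets (words : List (List Char)) (n maxLen : Nat) : List (List (Nat × Nat)) :=
  (List.range n).foldl (fun B i =>
    (List.range' (i + 1) (n - 1 - i)).foldl (fun B j =>
      let l := lcpGo (words.getD i []) (words.getD j []) maxLen 0
      B.set l (B.getD l [] ++ [(i, j)])) B) (List.replicate (maxLen + 1) [])

def bStep (words : List (List Char)) (chars : PySem.Set Char) (k : Nat)
    (st : PySem.Dict Char Int × PySem.Set (Char × Char)) (ij : Nat × Nat) :
    PySem.Dict Char Int × PySem.Set (Char × Char) :=
  let a := (words.getD ij.1 []).getD k ' '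
  let b := (words.getD ij.2 []).getD k ' '
  if chars.contains a && chars.contains b then
    let p := if a < b then (a, b) else (b, a)
    if st.2.contains p then st
    else (st.1.modify a (0 : Int) (· + 1), st.2.add p)
  else st

def solve_alt (arr : List String) : List String :=
  let words := arr.map (fun s => s.toList)
  let n := words.length
  let maxLen := PySem.List.maxD (words.map (fun w => w.length)) (fun x => x) 0
  let chars := words.foldl (fun s w => PySem.Set.update s w) PySem.Set.empty
  let buckets := bBuckets words n maxLen
  let cnt0 : PySem.Dict Char Int := chars.foldl (fun d c => d.insert c (0 : Int)) PySem.Dict.empty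
  let st := (List.range maxLen).foldl (fun st k =>
      (buckets.getD k []).foldl (bStep words chars k) st)
    (cnt0, (PySem.Set.empty : PySem.Set (Char × Char)))
  (PySem.List.sorted2 chars (fun c => st.1.getD c 0) (fun c => c) true).map (fun c => String.ofList [c])

-- ===== PRECONDITION & SPEC =====
def Spec_solve (arr : List String) (out : List String) : Prop := out = solve_alt arr
instance (arr : List String) (out : List String) : Decidable (Spec_solve arr out) := by
  unfold Spec_solve; infer_instance

-- ===== CLAIM (what is proved, stated in full; the proofs are below) =====
def Claim_equal_solve : Prop := ∀ (arr : List String), Dom_solve arr → Spec_solve arr (solve arr)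

-- ===== LEMMAS AND PROOFS =====

-- ---- basic normalizations of A's preprocessing ----

theorem aNewArr_eq (arr : List String) : aNewArr arr = arr.map (fun s => s.toList) := by
  unfold aNewArr
  rw [PySem.List.foldl_append_singleton_eq_map (f := fun s : String => s.toList.foldl (fun w c => w ++ [c]) [])]
  rw [List.nil_append]
  refine List.map_congr_left ?_
  intro s _
  rw [PySem.List.foldl_append_singleton_eq_self, List.nil_append]

theorem aUniq_eq (arr : List String) :
    aUniq arr = (arr.map (fun s => s.toList)).foldl (fun s w => PySem.Set.update s w) PySem.Set.empty := by
  unfold aUniq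
  rw [List.foldl_map]
  rfl

theorem bChars_nodup : ∀ (ws : List (List Char)) (s : PySem.Set Char), s.Nodup →
    (ws.foldl (fun s w => PySem.Set.update s w) s).Nodup := by
  intro ws
  induction ws with
  | nil => intro s hs; simpa using hs
  | cons w t ih => intro s hs; exact ih _ (PySem.Set.nodup_update s w hs)

theorem aMaxLen_eq (ws : List (List Char)) :
    aMaxLen ws = PySem.List.maxD (ws.map (fun w => w.length)) (fun x => x) 0 := by
  unfold aMaxLen
  have h1 : ws.foldl (fun m l => if m < l.length then l.length else m) 0
      = (ws.map (fun w => w.length)).foldl (fun m x => if m < x then x else m) 0 := by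
    rw [List.foldl_map]
  have h2 : ∀ (l : List Nat) (a : Nat),
      l.foldl (fun m x => if m < x then x else m) a = l.foldl max a := by
    intro l
    induction l with
    | nil => intro a; rfl
    | cons x t ih =>
      intro a
      simp only [List.foldl_cons, ih]
      congr 1
      by_cases h : a < x
      · rw [if_pos h, Nat.max_eq_right h.le]
      · rw [if_neg h, Nat.max_eq_left (Nat.le_of_not_lt h)]
  rw [h1, h2]
  cases h : ws.map (fun w => w.length) with
  | nil => rfl
  | cons x t =>
    unfold PySem.List.maxD
    rw [PySem.List.max?_id_cons]
    simp

theorem len_le_aMaxLen (ws : List (List Char)) (w : List Char) (hw : w ∈ ws) :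
    w.length ≤ aMaxLen ws := by
  rw [aMaxLen_eq]
  unfold PySem.List.maxD
  cases h : ws.map (fun w => w.length) with
  | nil => simp [List.map_eq_nil_iff] at h; simp [h] at hw
  | cons x t =>
    have := PySem.List.max?_isMax (xs := x :: t) (key := fun x => x) (m := t.foldl max x)
      (PySem.List.max?_id_cons x t) w.length
    rw [PySem.List.max?_id_cons]
    simp only [Option.getD_some]
    exact this (by rw [← h]; exact List.mem_map_of_mem hw)

theorem padRow_eq (l : List Char) (m : Nat) :
    (List.range m).foldl (fun w _ => w ++ [' ']) l = l ++ List.replicate m ' ' := by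
  rw [PySem.List.foldl_append_singleton_eq_map (f := fun _ : Nat => ' ')]
  simp [List.map_const']

theorem aPad_getD (M : Nat) (ws : List (List Char)) (i : Nat) (hi : i < ws.length) :
    (aPad M ws).getD i [] = ws.getD i [] ++ List.replicate (M - (ws.getD i []).length) ' ' := by
  unfold aPad
  rw [List.getD_eq_getElem?_getD, List.getElem?_map, List.getD_eq_getElem?_getD,
    List.getElem?_eq_getElem hi]
  exact padRow_eq _ _

theorem pad_getD_char (l : List Char) (m k : Nat) :
    (l ++ List.replicate m ' ').getD k ' ' = l.getD k ' ' := by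
  rw [List.getD_eq_getElem?_getD, List.getD_eq_getElem?_getD, List.getElem?_append]
  split
  · rfl
  · rename_i h
    rw [List.getElem?_replicate]
    have : l[k]? = none := by
      rw [List.getElem?_eq_none_iff]; omega
    rw [this]
    split <;> simp


-- ---- lcpGo characterization and the prefix-equality bridge ----

theorem lcpGo_props (x y : List Char) (M : Nat) : ∀ l : Nat,
    l ≤ lcpGo x y M l ∧ (l ≤ M → lcpGo x y M l ≤ M) ∧
    (∀ m, l ≤ m → m < lcpGo x y M l → x.getD m ' ' = y.getD m ' ') ∧
    (lcpGo x y M l < M → x.getD (lcpGo x y M l) ' ' ≠ y.getD (lcpGo x y M l) ' ') := by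
  suffices H : ∀ f l : Nat, M - l ≤ f →
      l ≤ lcpGo x y M l ∧ (l ≤ M → lcpGo x y M l ≤ M) ∧
      (∀ m, l ≤ m → m < lcpGo x y M l → x.getD m ' ' = y.getD m ' ') ∧
      (lcpGo x y M l < M → x.getD (lcpGo x y M l) ' ' ≠ y.getD (lcpGo x y M l) ' ') by
    intro l; exact H (M - l) l le_rfl
  intro f
  induction f with
  | zero =>
    intro l hl
    rw [lcpGo, dif_neg (by omega : ¬(l < M ∧ x.getD l ' ' = y.getD l ' '))]
    exact ⟨le_rfl, fun h => h, fun m hm hm2 => by omega, fun h => by omega⟩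
  | succ f ih =>
    intro l hl
    rw [lcpGo]
    by_cases hc : l < M ∧ x.getD l ' ' = y.getD l ' '
    · rw [dif_pos hc]
      obtain ⟨h1, h2, h3, h4⟩ := ih (l + 1) (by omega)
      refine ⟨by omega, fun _ => h2 (by omega), ?_, h4⟩
      intro m hm hm2
      rcases Nat.eq_or_lt_of_le hm with h | h
      · rw [← h]; exact hc.2
      · exact h3 m (by omega) hm2
    · rw [dif_neg hc]
      refine ⟨le_rfl, fun h => h, fun m hm hm2 => by omega, fun h => ?_⟩
      intro heq
      exact hc ⟨h, heq⟩

theorem take_pad_iff (ws : List (List Char)) (M : Nat)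
    (hM : ∀ w ∈ ws, w.length ≤ M) (i j k : Nat)
    (hi : i < ws.length) (hj : j < ws.length) (hk : k ≤ M) :
    List.take k ((aPad M ws).getD i []) = List.take k ((aPad M ws).getD j [])
      ↔ k ≤ lcpGo (ws.getD i []) (ws.getD j []) M 0 := by
  have hmemi : ws.getD i [] ∈ ws := by
    rw [List.getD_eq_getElem?_getD, List.getElem?_eq_getElem hi]; exact List.getElem_mem hi
  have hmemj : ws.getD j [] ∈ ws := by
    rw [List.getD_eq_getElem?_getD, List.getElem?_eq_getElem hj]; exact List.getElem_mem hj
  have hleni : (ws.getD i []).length ≤ M := hM _ hmemi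
  have hlenj : (ws.getD j []).length ≤ M := hM _ hmemj
  rw [aPad_getD M ws i hi, aPad_getD M ws j hj]
  set pi := ws.getD i [] ++ List.replicate (M - (ws.getD i []).length) ' ' with hpi
  set pj := ws.getD j [] ++ List.replicate (M - (ws.getD j []).length) ' ' with hpj
  have hpleni : pi.length = M := by
    rw [hpi, List.length_append, List.length_replicate]; omega
  have hplenj : pj.length = M := by
    rw [hpj, List.length_append, List.length_replicate]; omega
  have hgetd : ∀ m : Nat, pi.getD m ' ' = (ws.getD i []).getD m ' ' := by
    intro m; rw [hpi, pad_getD_char]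
  have hgetd' : ∀ m : Nat, pj.getD m ' ' = (ws.getD j []).getD m ' ' := by
    intro m; rw [hpj, pad_getD_char]
  obtain ⟨hg1, hg2, hg3, hg4⟩ := lcpGo_props (ws.getD i []) (ws.getD j []) M 0
  constructor
  · intro heq
    by_contra hlt
    rw [not_le] at hlt
    set L := lcpGo (ws.getD i []) (ws.getD j []) M 0 with hL
    refine hg4 (by omega) ?_
    have h2 := congrArg (fun l => l[L]?) heq
    simp only [List.getElem?_take] at h2
    rw [if_pos (by omega), if_pos (by omega)] at h2
    have h3 : pi.getD L ' ' = pj.getD L ' ' := by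
      rw [List.getD_eq_getElem?_getD, List.getD_eq_getElem?_getD, h2]
    rw [hgetd L, hgetd' L] at h3
    exact h3
  · intro hle
    apply List.ext_getElem?
    intro m
    simp only [List.getElem?_take]
    by_cases hm : m < k
    · rw [if_pos hm, if_pos hm, List.getElem?_eq_getElem (by omega),
        List.getElem?_eq_getElem (by omega)]
      have e1 : pi[m]'(by omega) = pi.getD m ' ' :=
        (List.getD_eq_getElem pi ' ' (by omega)).symm
      have e2 : pj[m]'(by omega) = pj.getD m ' ' :=
        (List.getD_eq_getElem pj ' ' (by omega)).symm
      rw [Option.some_inj, e1, e2, hgetd m, hgetd' m]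
      exact hg3 m (by omega) (by omega)
    · rw [if_neg hm, if_neg hm]

-- ---- canonical forms for A's flag dictionaries ----

def pnorm (a b : Char) : Char × Char := if a < b then (a, b) else (b, a)

theorem pnorm_comm (a b : Char) : pnorm a b = pnorm b a := by
  unfold pnorm
  rcases lt_trichotomy a b with h | h | h
  · rw [if_pos h, if_neg (asymm h)]
  · subst h; simp
  · rw [if_neg (asymm h), if_pos h]

theorem pnorm_eq_iff (a b c d : Char) :
    pnorm a b = pnorm c d ↔ ((a = c ∧ b = d) ∨ (a = d ∧ b = c)) := by
  constructor
  · intro h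
    unfold pnorm at h
    split_ifs at h <;> rw [Prod.mk.injEq] at h <;> tauto
  · rintro (⟨rfl, rfl⟩ | ⟨rfl, rfl⟩)
    · rfl
    · exact pnorm_comm a b

def flagv (seen : List (Char × Char)) (c b : Char) : Int :=
  if pnorm c b ∈ seen then 1 else 0

theorem flagv_append_ne {c b : Char} {p : Char × Char} (seen : List (Char × Char))
    (h : pnorm c b ≠ p) : flagv (seen ++ [p]) c b = flagv seen c b := by
  unfold flagv
  simp [List.mem_append, h]

def innerD (chars : List Char) (seen : List (Char × Char)) (c : Char) : PySem.Dict Char Int :=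
  PySem.Dict.mk ((chars.filter (fun b => c ≠ b)).map (fun b => (b, flagv seen c b)))

def canonD (chars : List Char) (seen : List (Char × Char)) :
    PySem.Dict Char (PySem.Dict Char Int) :=
  PySem.Dict.mk (chars.map (fun c => (c, innerD chars seen c)))

theorem keys_canonD (chars : List Char) (seen : List (Char × Char)) :
    (canonD chars seen).keys = chars := by
  simp only [canonD, PySem.Dict.keys]
  rw [List.map_map]
  have : ((fun x : Char × PySem.Dict Char Int => x.1) ∘ fun c => (c, innerD chars seen c))
      = fun c => c := rfl
  rw [this, List.map_id']

theorem keys_innerD (chars : List Char) (seen : List (Char × Char)) (c : Char) :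
    (innerD chars seen c).keys = chars.filter (fun b => c ≠ b) := by
  simp only [innerD, PySem.Dict.keys]
  rw [List.map_map]
  have : ((fun x : Char × Int => x.1) ∘ fun b => (b, flagv seen c b)) = fun b => b := rfl
  rw [this, List.map_id']

theorem canonD_get? (chars : List Char) (seen : List (Char × Char)) (hnd : chars.Nodup)
    (c : Char) :
    (canonD chars seen).get? c = if c ∈ chars then some (innerD chars seen c) else none := by
  split
  · rename_i h
    rw [PySem.Dict.get?_eq_some_iff_mem_items _ _ _ (by rw [keys_canonD]; exact hnd)]
    simp only [canonD]
    exact List.mem_map.mpr ⟨c, h, rfl⟩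
  · rename_i h
    rw [PySem.Dict.get?_eq_none_iff_not_mem_keys, keys_canonD]
    exact h

theorem innerD_get? (chars : List Char) (seen : List (Char × Char)) (hnd : chars.Nodup)
    (c b : Char) :
    (innerD chars seen c).get? b
      = if b ∈ chars ∧ c ≠ b then some (flagv seen c b) else none := by
  split
  · rename_i h
    rw [PySem.Dict.get?_eq_some_iff_mem_items _ _ _
      (by rw [keys_innerD]; exact hnd.filter _)]
    simp only [innerD]
    exact List.mem_map.mpr ⟨b, List.mem_filter.mpr ⟨h.1, by simp [h.2]⟩, rfl⟩
  · rename_i h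
    rw [PySem.Dict.get?_eq_none_iff_not_mem_keys, keys_innerD]
    intro hmem
    rcases List.mem_filter.mp hmem with ⟨h1, h2⟩
    exact h ⟨h1, by simpa using h2⟩

theorem inner_update_left (chars : List Char) (seen : List (Char × Char)) {a b : Char}
    (hb : b ∈ chars) (hab : a ≠ b) :
    (innerD chars seen a).insert b 1 = innerD chars (seen ++ [pnorm a b]) a := by
  apply PySem.Dict.ext
  have hcont : (innerD chars seen a).contains b := by
    rw [PySem.Dict.contains_iff_mem_keys, keys_innerD]
    exact List.mem_filter.mpr ⟨hb, by simp [hab]⟩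
  rw [PySem.Dict.items_insert_of_contains _ _ hcont]
  simp only [innerD]
  rw [List.map_map]
  apply List.map_congr_left
  intro b' hb'
  rcases List.mem_filter.mp hb' with ⟨hb'c, hb'ne⟩
  have hab' : a ≠ b' := by simpa using hb'ne
  by_cases h : b' = b
  · subst h
    have hflag : flagv (seen ++ [pnorm a b']) a b' = 1 := by
      unfold flagv
      rw [if_pos (by simp)]
    simp [hflag]
  · have hflag : flagv (seen ++ [pnorm a b]) a b' = flagv seen a b' :=
      flagv_append_ne seen (by
        rw [Ne, pnorm_eq_iff]
        rintro (⟨h1, h2⟩ | ⟨h1, h2⟩)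
        · exact h h2
        · exact hab h1)
    simp [h, hflag]

theorem inner_update_right (chars : List Char) (seen : List (Char × Char)) {a b : Char}
    (ha : a ∈ chars) (hab : a ≠ b) :
    (innerD chars seen b).insert a 1 = innerD chars (seen ++ [pnorm a b]) b := by
  apply PySem.Dict.ext
  have hcont : (innerD chars seen b).contains a := by
    rw [PySem.Dict.contains_iff_mem_keys, keys_innerD]
    exact List.mem_filter.mpr ⟨ha, by simp [Ne.symm hab]⟩
  rw [PySem.Dict.items_insert_of_contains _ _ hcont]
  simp only [innerD]
  rw [List.map_map]
  apply List.map_congr_left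
  intro b' hb'
  rcases List.mem_filter.mp hb' with ⟨hb'c, hb'ne⟩
  have hbb' : b ≠ b' := by simpa using hb'ne
  by_cases h : b' = a
  · subst h
    have hflag : flagv (seen ++ [pnorm b' b]) b b' = 1 := by
      unfold flagv
      rw [pnorm_comm, if_pos (by simp)]
    simp [hflag]
  · have hflag : flagv (seen ++ [pnorm a b]) b b' = flagv seen b b' :=
      flagv_append_ne seen (by
        rw [Ne, pnorm_eq_iff]
        rintro (⟨h1, h2⟩ | ⟨h1, h2⟩)
        · exact hab h1.symm
        · exact h h2)
    simp [h, hflag]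

theorem inner_other (chars : List Char) (seen : List (Char × Char)) {a b c : Char}
    (hca : c ≠ a) (hcb : c ≠ b) :
    innerD chars (seen ++ [pnorm a b]) c = innerD chars seen c := by
  unfold innerD
  congr 1
  apply List.map_congr_left
  intro b' _
  rw [flagv_append_ne seen (by
    rw [Ne, pnorm_eq_iff]
    rintro (⟨h1, h2⟩ | ⟨h1, h2⟩)
    · exact hca h1
    · exact hcb h1)]

theorem update_canon (chars : List Char) (seen : List (Char × Char)) (hnd : chars.Nodup)
    {a b : Char} (ha : a ∈ chars) (hb : b ∈ chars) (hab : a ≠ b) :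
    ((canonD chars seen).insert a ((innerD chars seen a).insert b 1)).modify b
        PySem.Dict.empty (fun db => db.insert a 1)
      = canonD chars (seen ++ [pnorm a b]) := by
  have hconta : (canonD chars seen).contains a := by
    rw [PySem.Dict.contains_iff_mem_keys, keys_canonD]; exact ha
  have hD1items : ((canonD chars seen).insert a ((innerD chars seen a).insert b 1)).items
      = chars.map (fun c => (c,
          if c = a then (innerD chars seen a).insert b 1 else innerD chars seen c)) := by
    rw [PySem.Dict.items_insert_of_contains _ _ hconta]
    simp only [canonD]
    rw [List.map_map]
    apply List.map_congr_left
    intro c _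
    by_cases hca : c = a
    · subst hca; simp
    · simp [hca]
  have hcontb : ((canonD chars seen).insert a ((innerD chars seen a).insert b 1)).contains b := by
    rw [PySem.Dict.contains_iff_mem_keys,
      PySem.Dict.keys_insert_of_contains _ _ hconta, keys_canonD]
    exact hb
  have hgetb : ((canonD chars seen).insert a ((innerD chars seen a).insert b 1)).getD b
      PySem.Dict.empty = innerD chars seen b := by
    rw [PySem.Dict.getD_insert_of_ne _ _ _ (Ne.symm hab),
      PySem.Dict.getD_eq_get?_getD, canonD_get? chars seen hnd, if_pos hb]
    rfl
  simp only [PySem.Dict.modify]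
  rw [hgetb]
  apply PySem.Dict.ext
  rw [PySem.Dict.items_insert_of_contains _ _ hcontb, hD1items]
  simp only [canonD]
  rw [List.map_map]
  apply List.map_congr_left
  intro c hc
  by_cases hca : c = a
  · subst hca
    simp only [Function.comp_apply]
    simp [hab]
    rw [inner_update_left chars seen hb hab]
  · by_cases hcb : c = b
    · subst hcb
      simp only [Function.comp_apply]
      simp
      rw [inner_update_right chars seen ha hab]
    · simp only [Function.comp_apply]
      simp [hca, hcb]
      rw [inner_other chars seen hca hcb]

-- ---- the initial dictionaries in canonical form ----

theorem aInner_go (a : Char) : ∀ (chars : List Char) (d : PySem.Dict Char Int),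
    (∀ b ∈ chars, d.contains b = false) → chars.Nodup →
    (chars.foldl (fun d b => if a ≠ b then d.insert b (0 : Int) else d) d).items
      = d.items ++ (chars.filter (fun b => a ≠ b)).map (fun b => (b, (0 : Int))) := by
  intro chars
  induction chars with
  | nil => intro d _ _; simp
  | cons c t ih =>
    intro d hfresh hnd
    simp only [List.foldl_cons]
    by_cases hac : a ≠ c
    · rw [if_pos hac]
      rw [ih (d.insert c 0) ?_ hnd.of_cons]
      · rw [PySem.Dict.items_insert_of_not_contains _ _ (hfresh c (by simp))]
        rw [List.filter_cons_of_pos (by simpa using hac)]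
        rw [List.append_assoc]
        rfl
      · intro b hb
        have hbc : b ≠ c := by
          rintro rfl
          exact (List.nodup_cons.mp hnd).1 hb
        rw [PySem.Dict.contains_insert]
        have h1 : (b == c) = false := by simpa using hbc
        rw [h1, Bool.false_or]
        exact hfresh b (by simp [hb])
    · rw [if_neg hac]
      rw [ih d (fun b hb => hfresh b (by simp [hb])) hnd.of_cons]
      rw [List.filter_cons_of_neg (by simpa using hac)]

theorem aInner_eq (chars : List Char) (hnd : chars.Nodup) (a : Char) :
    aInner chars a = innerD chars [] a := by
  unfold aInner
  apply PySem.Dict.ext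
  rw [aInner_go a chars PySem.Dict.empty (fun b _ => PySem.Dict.contains_empty b) hnd]
  simp only [innerD]
  have : ∀ b' : Char, flagv [] a b' = 0 := by
    intro b'; unfold flagv; simp
  simp only [this]
  rfl

theorem aDict0_eq (chars : List Char) (hnd : chars.Nodup) :
    aDict0 chars = canonD chars [] := by
  unfold aDict0
  apply PySem.Dict.ext
  rw [PySem.Dict.items_foldl_insert_fresh _ (fun a => a) (fun a => aInner chars a) _
    (fun x _ => PySem.Dict.contains_empty x) (by simpa using hnd)]
  simp only [canonD]
  apply List.map_congr_left
  intro c _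
  rw [aInner_eq chars hnd c]

theorem wl0_keys (chars : List Char) (hnd : chars.Nodup) :
    (chars.foldl (fun d c => d.insert c (0 : Int)) PySem.Dict.empty).keys = chars := by
  rw [PySem.Dict.keys_foldl_insert]
  simp only [PySem.Dict.keys_empty]
  rw [PySem.Set.update_nil_left]
  exact PySem.Set.ofList_eq_self_of_nodup chars hnd

-- ---- flattening the paired loops ----

def pairsOf (n : Nat) : List (Nat × Nat) :=
  (List.range (n - 1)).flatMap (fun i => (List.range' (i + 1) (n - 1 - i)).map (fun j => (i, j)))

theorem mem_pairsOf {n : Nat} {ij : Nat × Nat} (h : ij ∈ pairsOf n) :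
    ij.1 < ij.2 ∧ ij.2 < n := by
  unfold pairsOf at h
  rw [List.mem_flatMap] at h
  obtain ⟨i, hi, hmem⟩ := h
  rw [List.mem_map] at hmem
  obtain ⟨j, hj, rfl⟩ := hmem
  rw [List.mem_range] at hi
  rw [List.mem_range'_1] at hj
  constructor <;> simp <;> omega

theorem foldl_double_eq_pairs {σ : Type} (f : σ → Nat × Nat → σ) (n : Nat) (st : σ) :
    (List.range (n - 1)).foldl (fun st i =>
      (List.range' (i + 1) (n - 1 - i)).foldl (fun st j => f st (i, j)) st) st
      = (pairsOf n).foldl f st := by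
  unfold pairsOf
  rw [List.flatMap_def, List.foldl_flatten, List.foldl_map]
  apply PySem.List.foldl_congr_mem
  intro acc i _
  rw [List.foldl_map]

theorem foldl_double_eq_pairs' {σ : Type} (f : σ → Nat × Nat → σ) (n : Nat) (st : σ) :
    (List.range n).foldl (fun st i =>
      (List.range' (i + 1) (n - 1 - i)).foldl (fun st j => f st (i, j)) st) st
      = (pairsOf n).foldl f st := by
  cases n with
  | zero => rfl
  | succ m =>
    rw [List.range_succ, List.foldl_append]
    have hlast : (List.range' (m + 1) (m + 1 - 1 - m)).foldl
        (fun st j => f st (m, j)) ((List.range m).foldl (fun st i =>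
          (List.range' (i + 1) (m + 1 - 1 - i)).foldl (fun st j => f st (i, j)) st) st)
        = (List.range m).foldl (fun st i =>
          (List.range' (i + 1) (m + 1 - 1 - i)).foldl (fun st j => f st (i, j)) st) st := by
      have : m + 1 - 1 - m = 0 := by omega
      rw [this, List.range'_zero, List.foldl_nil]
    simp only [List.foldl_cons, List.foldl_nil]
    rw [hlast, ← foldl_double_eq_pairs f (m + 1) st]
    rfl

-- ---- the bucket table holds exactly the pairs with that common-prefix length ----

def lcpOf (ws : List (List Char)) (M : Nat) (ij : Nat × Nat) : Nat :=
  lcpGo (ws.getD ij.1 []) (ws.getD ij.2 []) M 0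

theorem buckets_go (ws : List (List Char)) (M : Nat) :
    ∀ (L : List (Nat × Nat)) (B : List (List (Nat × Nat))), B.length = M + 1 →
      (L.foldl (fun B ij => B.set (lcpOf ws M ij) (B.getD (lcpOf ws M ij) [] ++ [ij])) B).length = M + 1 ∧
      ∀ k, k ≤ M →
        (L.foldl (fun B ij => B.set (lcpOf ws M ij) (B.getD (lcpOf ws M ij) [] ++ [ij])) B).getD k []
          = B.getD k [] ++ L.filter (fun ij => lcpOf ws M ij = k) := by
  intro L
  induction L with
  | nil => intro B hB; exact ⟨hB, fun k _ => by simp⟩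
  | cons ij t ih =>
    intro B hB
    simp only [List.foldl_cons]
    set B' := B.set (lcpOf ws M ij) (B.getD (lcpOf ws M ij) [] ++ [ij]) with hB'
    have hlen : B'.length = M + 1 := by rw [hB', List.length_set]; exact hB
    obtain ⟨ih1, ih2⟩ := ih B' hlen
    refine ⟨ih1, fun k hk => ?_⟩
    rw [ih2 k hk]
    have hgd : B'.getD k [] = if lcpOf ws M ij = k then B.getD k [] ++ [ij] else B.getD k [] := by
      rw [hB', List.getD_eq_getElem?_getD, List.getElem?_set]
      split
      · rename_i h
        rw [if_pos (by omega : lcpOf ws M ij < B.length)]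
        simp [h, List.getD_eq_getElem?_getD]
      · rename_i h
        rw [← List.getD_eq_getElem?_getD]
    rw [hgd]
    by_cases h : lcpOf ws M ij = k
    · rw [if_pos h, List.filter_cons_of_pos (by simpa using h), List.append_assoc]
      rfl
    · rw [if_neg h, List.filter_cons_of_neg (by simpa using h)]

theorem bBuckets_getD (ws : List (List Char)) (M k : Nat) (hk : k ≤ M) :
    (bBuckets ws ws.length M).getD k []
      = (pairsOf ws.length).filter (fun ij => lcpOf ws M ij = k) := by
  have heq : bBuckets ws ws.length M
      = (pairsOf ws.length).foldl
          (fun B ij => B.set (lcpOf ws M ij) (B.getD (lcpOf ws M ij) [] ++ [ij]))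
          (List.replicate (M + 1) []) := by
    unfold bBuckets
    exact foldl_double_eq_pairs'
      (f := fun B ij => B.set (lcpOf ws M ij) (B.getD (lcpOf ws M ij) [] ++ [ij]))
      ws.length (List.replicate (M + 1) [])
  rw [heq]
  obtain ⟨_, h2⟩ := buckets_go ws M (pairsOf ws.length) (List.replicate (M + 1) [])
    (by rw [List.length_replicate])
  rw [h2 k hk]
  rw [List.getD_eq_getElem?_getD, List.getElem?_replicate, if_pos (by omega)]
  rfl

-- ---- the step-by-step simulation ----

def RelSt (chars : List Char)
    (stA : PySem.Dict Char (PySem.Dict Char Int) × PySem.Dict Char Int)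
    (stB : PySem.Dict Char Int × PySem.Set (Char × Char)) : Prop :=
  stA.1 = canonD chars stB.2 ∧ stA.2 = stB.1 ∧ stB.1.keys = chars

theorem slice_prefix_iff (ws : List (List Char)) (M : Nat)
    (hM : ∀ w ∈ ws, w.length ≤ M) (i j k : Nat)
    (hi : i < ws.length) (hj : j < ws.length) (hk : k ≤ M) :
    (String.ofList (PySem.List.slice ((aPad M ws).getD i []) (some 0) (some (k : Int)))
      = String.ofList (PySem.List.slice ((aPad M ws).getD j []) (some 0) (some (k : Int))))
      ↔ k ≤ lcpGo (ws.getD i []) (ws.getD j []) M 0 := by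
  have hs : ∀ xs : List Char, PySem.List.slice xs (some 0) (some (k : Int)) = xs.take k := by
    intro xs
    simp
  rw [hs, hs]
  rw [show (String.ofList (List.take k ((aPad M ws).getD i []))
      = String.ofList (List.take k ((aPad M ws).getD j [])))
      ↔ (List.take k ((aPad M ws).getD i []) = List.take k ((aPad M ws).getD j [])) by
    constructor
    · intro h; have := congrArg String.toList h; simpa using this
    · intro h; rw [h]]
  exact take_pad_iff ws M hM i j k hi hj hk

theorem pad_char_access (ws : List (List Char)) (M : Nat) (i k : Nat) (hi : i < ws.length) :
    ((aPad M ws).getD i []).getD k ' ' = (ws.getD i []).getD k ' ' := by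
  rw [aPad_getD M ws i hi, pad_getD_char]

theorem step_sim (ws : List (List Char)) (M : Nat) (chars : List Char) (hnd : chars.Nodup)
    (hM : ∀ w ∈ ws, w.length ≤ M) (k : Nat) (hk : k < M) (ij : Nat × Nat)
    (hij : ij.1 < ij.2 ∧ ij.2 < ws.length)
    (stA : PySem.Dict Char (PySem.Dict Char Int) × PySem.Dict Char Int)
    (stB : PySem.Dict Char Int × PySem.Set (Char × Char))
    (hrel : RelSt chars stA stB) (hlcp : lcpOf ws M ij = k) :
    RelSt chars (aStep (aPad M ws) k ij.1 ij.2 stA) (bStep ws chars k stB ij) := by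
  obtain ⟨hrel1, hrel2, hrel3⟩ := hrel
  have hi : ij.1 < ws.length := by omega
  have hj : ij.2 < ws.length := by omega
  unfold aStep bStep
  simp only
  rw [if_pos ((slice_prefix_iff ws M hM ij.1 ij.2 k hi hj hk.le).mpr (by rw [← hlcp]; rfl))]
  rw [pad_char_access ws M ij.1 k hi, pad_char_access ws M ij.2 k hj]
  set a := (ws.getD ij.1 []).getD k ' ' with hav
  set b := (ws.getD ij.2 []).getD k ' ' with hbv
  have hab : a ≠ b := by
    have := (lcpGo_props (ws.getD ij.1 []) (ws.getD ij.2 []) M 0).2.2.2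
    rw [show lcpGo (ws.getD ij.1 []) (ws.getD ij.2 []) M 0 = k from hlcp] at this
    exact this hk
  by_cases ha : a ∈ chars
  · cases hma : stA.1.get? a with
    | none =>
      rw [hrel1, canonD_get? chars stB.2 hnd, if_pos ha] at hma
      exact absurd hma (by simp)
    | some da =>
      have hda : da = innerD chars stB.2 a := by
        rw [hrel1, canonD_get? chars stB.2 hnd, if_pos ha] at hma
        exact (Option.some_inj.mp hma).symm
      subst hda
      simp only []
      by_cases hb : b ∈ chars
      · cases hmb : (innerD chars stB.2 a).get? b with
        | none =>
          rw [innerD_get? chars stB.2 hnd a b, if_pos ⟨hb, hab⟩] at hmb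
          exact absurd hmb (by simp)
        | some v =>
          simp only []
          have hv : v = flagv stB.2 a b := by
            rw [innerD_get? chars stB.2 hnd a b, if_pos ⟨hb, hab⟩] at hmb
            exact (Option.some_inj.mp hmb).symm
          subst hv
          have hcond : (PySem.Set.contains chars a && PySem.Set.contains chars b) = true := by
            rw [(PySem.Set.contains_iff chars a).mpr ha, (PySem.Set.contains_iff chars b).mpr hb]
            rfl
          rw [if_pos hcond]
          rw [show (if a < b then (a, b) else (b, a)) = pnorm a b from rfl]
          by_cases hmem : pnorm a b ∈ stB.2
          · rw [if_pos ((PySem.Set.contains_iff stB.2 (pnorm a b)).mpr hmem)]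
            have hflag : flagv stB.2 a b = 1 := by unfold flagv; rw [if_pos hmem]
            rw [hflag, if_neg (by omega)]
            exact ⟨hrel1, hrel2, hrel3⟩
          · rw [if_neg (fun hcon => hmem ((PySem.Set.contains_iff stB.2 (pnorm a b)).mp hcon))]
            have hflag : flagv stB.2 a b = 0 := by unfold flagv; rw [if_neg hmem]
            rw [hflag, if_pos rfl]
            refine ⟨?_, ?_, ?_⟩
            · simp only
              rw [hrel1, PySem.Set.add_of_not_mem hmem]
              exact update_canon chars stB.2 hnd ha hb hab
            · simp only
              rw [hrel2]
            · simp only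
              rw [PySem.Dict.keys_modify, PySem.Dict.keys_insert_of_contains _ _
                (by rw [PySem.Dict.contains_iff_mem_keys, hrel3]; exact ha)]
              exact hrel3
      · cases hmb : (innerD chars stB.2 a).get? b with
        | some v =>
          rw [innerD_get? chars stB.2 hnd a b, if_neg (fun hcon => hb hcon.1)] at hmb
          exact absurd hmb (by simp)
        | none =>
          rw [if_neg (show ¬(PySem.Set.contains chars a && PySem.Set.contains chars b) = true by
            intro hcon
            rcases Bool.and_eq_true_iff.mp hcon with ⟨_, h2⟩
            exact hb ((PySem.Set.contains_iff chars b).mp h2))]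
          exact ⟨hrel1, hrel2, hrel3⟩
  · cases hma : stA.1.get? a with
    | some da =>
      rw [hrel1, canonD_get? chars stB.2 hnd, if_neg ha] at hma
      exact absurd hma (by simp)
    | none =>
      rw [if_neg (show ¬(PySem.Set.contains chars a && PySem.Set.contains chars b) = true by
        intro hcon
        rcases Bool.and_eq_true_iff.mp hcon with ⟨h1, _⟩
        exact ha ((PySem.Set.contains_iff chars a).mp h1))]
      exact ⟨hrel1, hrel2, hrel3⟩

theorem step_noop (ws : List (List Char)) (M : Nat) (chars : List Char) (hnd : chars.Nodup)
    (hM : ∀ w ∈ ws, w.length ≤ M) (k : Nat) (hk : k < M) (ij : Nat × Nat)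
    (hij : ij.1 < ij.2 ∧ ij.2 < ws.length)
    (stA : PySem.Dict Char (PySem.Dict Char Int) × PySem.Dict Char Int)
    (seen : PySem.Set (Char × Char)) (hcanon : stA.1 = canonD chars seen)
    (hlcp : lcpOf ws M ij ≠ k) :
    aStep (aPad M ws) k ij.1 ij.2 stA = stA := by
  have hi : ij.1 < ws.length := by omega
  have hj : ij.2 < ws.length := by omega
  unfold aStep
  simp only
  by_cases hle : k ≤ lcpGo (ws.getD ij.1 []) (ws.getD ij.2 []) M 0
  · rw [if_pos ((slice_prefix_iff ws M hM ij.1 ij.2 k hi hj hk.le).mpr hle)]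
    have hlt : k < lcpGo (ws.getD ij.1 []) (ws.getD ij.2 []) M 0 :=
      Nat.lt_of_le_of_ne hle (fun he => hlcp (by unfold lcpOf; omega))
    rw [pad_char_access ws M ij.1 k hi, pad_char_access ws M ij.2 k hj]
    have hab : (ws.getD ij.1 []).getD k ' ' = (ws.getD ij.2 []).getD k ' ' :=
      (lcpGo_props (ws.getD ij.1 []) (ws.getD ij.2 []) M 0).2.2.1 k (Nat.zero_le k) hlt
    cases hma : stA.1.get? ((ws.getD ij.1 []).getD k ' ') with
    | none => rfl
    | some da =>
      by_cases ha : (ws.getD ij.1 []).getD k ' ' ∈ chars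
      · have hda : da = innerD chars seen ((ws.getD ij.1 []).getD k ' ') := by
          rw [hcanon, canonD_get? chars seen hnd, if_pos ha] at hma
          exact (Option.some_inj.mp hma).symm
        subst hda
        simp only []
        cases hmb : (innerD chars seen ((ws.getD ij.1 []).getD k ' ')).get?
            ((ws.getD ij.2 []).getD k ' ') with
        | none => rfl
        | some v =>
          rw [innerD_get? chars seen hnd, if_neg (fun hcon => hcon.2 hab)] at hmb
          exact absurd hmb (by simp)
      · rw [hcanon, canonD_get? chars seen hnd, if_neg ha] at hma
        exact absurd hma (by simp)
  · rw [if_neg (fun hcon =>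
      hle ((slice_prefix_iff ws M hM ij.1 ij.2 k hi hj hk.le).mp hcon))]

theorem perK (ws : List (List Char)) (M : Nat) (chars : List Char) (hnd : chars.Nodup)
    (hM : ∀ w ∈ ws, w.length ≤ M) (k : Nat) (hk : k < M) :
    ∀ (L : List (Nat × Nat)), (∀ ij ∈ L, ij.1 < ij.2 ∧ ij.2 < ws.length) →
    ∀ stA stB, RelSt chars stA stB →
    RelSt chars (L.foldl (fun st ij => aStep (aPad M ws) k ij.1 ij.2 st) stA)
      ((L.filter (fun ij => lcpOf ws M ij = k)).foldl (bStep ws chars k) stB) := by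
  intro L
  induction L with
  | nil => intro _ stA stB h; exact h
  | cons ij t ih =>
    intro hmem stA stB hrel
    simp only [List.foldl_cons]
    by_cases h : lcpOf ws M ij = k
    · rw [List.filter_cons_of_pos (by simpa using h)]
      simp only [List.foldl_cons]
      exact ih (fun x hx => hmem x (by simp [hx]))
        _ _ (step_sim ws M chars hnd hM k hk ij (hmem ij (by simp)) stA stB hrel h)
    · rw [List.filter_cons_of_neg (by simpa using h)]
      rw [step_noop ws M chars hnd hM k hk ij (hmem ij (by simp)) stA stB.2 hrel.1 h]
      exact ih (fun x hx => hmem x (by simp [hx])) _ _ hrel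

theorem mainSim (ws : List (List Char)) (M : Nat) (chars : List Char) (hnd : chars.Nodup)
    (hM : ∀ w ∈ ws, w.length ≤ M) :
    ∀ (ks : List Nat), (∀ k ∈ ks, k < M) →
    ∀ stA stB, RelSt chars stA stB →
    RelSt chars
      (ks.foldl (fun st k =>
        (pairsOf ws.length).foldl (fun st ij => aStep (aPad M ws) k ij.1 ij.2 st) st) stA)
      (ks.foldl (fun st k =>
        ((pairsOf ws.length).filter (fun ij => lcpOf ws M ij = k)).foldl
          (bStep ws chars k) st) stB) := by
  intro ks
  induction ks with
  | nil => intro _ stA stB h; exact h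
  | cons k t ih =>
    intro hmem stA stB hrel
    simp only [List.foldl_cons]
    exact ih (fun x hx => hmem x (by simp [hx])) _ _
      (perK ws M chars hnd hM k (hmem k (by simp)) (pairsOf ws.length)
        (fun ij hij => mem_pairsOf hij) stA stB hrel)

-- ---- the final sort: sorting the (count, char) pairs is sorting the chars ----

theorem insertBy_map {α β : Type} (m : α → β) (befB : β → β → Bool) (befA : α → α → Bool)
    (h : ∀ x y, befB (m x) (m y) = befA x y) (x : α) :
    ∀ l : List α, PySem.List.insertBy befB (m x) (l.map m)
      = (PySem.List.insertBy befA x l).map m := by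
  intro l
  induction l with
  | nil => rfl
  | cons y t ih =>
    simp only [List.map_cons, PySem.List.insertBy, h x y]
    cases befA x y with
    | true => simp
    | false => simp [ih]

theorem foldl_insertBy_map {α β : Type} (m : α → β) (befB : β → β → Bool)
    (befA : α → α → Bool) (h : ∀ x y, befB (m x) (m y) = befA x y) :
    ∀ (l : List α) (acc : List α),
      (l.map m).foldl (fun acc x => PySem.List.insertBy befB x acc) (acc.map m)
        = (l.foldl (fun acc x => PySem.List.insertBy befA x acc) acc).map m := by
  intro l
  induction l with
  | nil => intro acc; rfl
  | cons x t ih =>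
    intro acc
    simp only [List.map_cons, List.foldl_cons]
    rw [insertBy_map m befB befA h x acc, ih]

theorem sorted2_map_pair (chars : List Char) (f : Char → Int) :
    PySem.List.sorted2 (chars.map (fun c => (f c, c))) Prod.fst Prod.snd true
      = (PySem.List.sorted2 chars f (fun c => c) true).map (fun c => (f c, c)) := by
  unfold PySem.List.sorted2
  exact foldl_insertBy_map (fun c => (f c, c)) _ _ (fun x y => rfl) chars []

theorem res_eq (chars : List Char) (W : PySem.Dict Char Int)
    (hkeys : W.keys = chars) (hnd : chars.Nodup) :
    W.items.foldl (fun (r : List (Int × Char)) p => r ++ [(p.2, p.1)]) []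
      = chars.map (fun c => (W.getD c 0, c)) := by
  rw [PySem.List.foldl_append_singleton_eq_map (f := fun p : Char × Int => (p.2, p.1))]
  rw [List.nil_append]
  rw [PySem.Dict.items_eq_map_keys W (by rw [hkeys]; exact hnd) 0]
  rw [hkeys, List.map_map]
  rfl

-- ===== VERDICT (by name: the statement is the Claim_ definition above) =====
theorem solve_spec : Claim_equal_solve := by
  intro arr _
  show solve arr = solve_alt arr
  simp only [solve, solve_alt]
  rw [aNewArr_eq, aUniq_eq]
  set ws := arr.map (fun s => s.toList) with hws
  set chars := ws.foldl (fun s w => PySem.Set.update s w) PySem.Set.empty with hchars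
  rw [← aMaxLen_eq ws]
  set M := aMaxLen ws with hMdef
  have hlen : (aPad M ws).length = ws.length := by unfold aPad; rw [List.length_map]
  rw [hlen]
  have hnd : chars.Nodup := bChars_nodup ws PySem.Set.empty List.nodup_nil
  have hMle : ∀ w ∈ ws, w.length ≤ M := fun w hw => len_le_aMaxLen ws w hw
  unfold aLoop
  have hA : ∀ st0 : PySem.Dict Char (PySem.Dict Char Int) × PySem.Dict Char Int,
      (List.range M).foldl (fun st k =>
        (List.range (ws.length - 1)).foldl (fun st i =>
          (List.range' (i + 1) (ws.length - 1 - i)).foldl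
            (fun st j => aStep (aPad M ws) k i j st) st) st) st0
      = (List.range M).foldl (fun st k =>
        (pairsOf ws.length).foldl (fun st ij => aStep (aPad M ws) k ij.1 ij.2 st) st) st0 := by
    intro st0
    apply PySem.List.foldl_congr_mem
    intro acc k _
    exact foldl_double_eq_pairs (f := fun st ij => aStep (aPad M ws) k ij.1 ij.2 st)
      ws.length acc
  rw [hA]
  have hB : ∀ st0 : PySem.Dict Char Int × PySem.Set (Char × Char),
      (List.range M).foldl (fun st k =>
        ((bBuckets ws ws.length M).getD k []).foldl (bStep ws chars k) st) st0
      = (List.range M).foldl (fun st k =>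
        ((pairsOf ws.length).filter (fun ij => lcpOf ws M ij = k)).foldl
          (bStep ws chars k) st) st0 := by
    intro st0
    apply PySem.List.foldl_congr_mem
    intro acc k hkmem
    rw [bBuckets_getD ws M k (le_of_lt (List.mem_range.mp hkmem))]
  rw [hB]
  have hrel0 : RelSt chars (aDict0 chars, aWl0 chars)
      (chars.foldl (fun d c => d.insert c (0 : Int)) PySem.Dict.empty, PySem.Set.empty) :=
    ⟨aDict0_eq chars hnd, rfl, wl0_keys chars hnd⟩
  obtain ⟨hst1, hst2, hst3⟩ := mainSim ws M chars hnd hMle (List.range M)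
    (fun k hk => List.mem_range.mp hk) _ _ hrel0
  rw [res_eq chars _ (by rw [hst2]; exact hst3) hnd]
  rw [hst2]
  rw [sorted2_map_pair chars]
  rw [PySem.List.foldl_append_singleton_eq_map (f := fun p : Int × Char => String.ofList [p.2])]
  rw [List.nil_append, List.map_map]
  rfl
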